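-- pv_equiv track=rewrite | github.com/Project-X-The-Next-Horizon/BrewScape-DataCollection | visualise_collection_radius_baseon_pd/generate_lat_lng_radius.py | _build_radius_bands
-- ===== SOURCE A (Python) =====
-- def _build_radius_bands(min_radius: int, max_radius: int, band_step: int) -> list[tuple[int, int]]:
--     highs: list[int] = []
--     current = max_radius
--     while current > min_radius:
--         highs.append(current)
--         current -= band_step
--     highs.append(min_radius)
--     bands: list[tuple[int, int]] = []
--     for idx, high in enumerate(highs):
--         low = highs[idx + 1] + 1 if idx + 1 < len(highs) else min_radius
--         bands.append((low, high))
--     return bands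
-- ===== SOURCE B (Python) =====
-- def _build_radius_bands(min_radius: int, max_radius: int, band_step: int) -> list[tuple[int, int]]:
--     bands: list[tuple[int, int]] = []
--     current = max_radius
--     while current > min_radius:
--         nxt = current - band_step
--         bands.append((nxt + 1 if nxt > min_radius else min_radius + 1, current))
--         current = nxt
--     bands.append((min_radius, min_radius))
--     return bands
-- ===== Notes on version B (the rewrite author's own statement) =====
-- stated objective: simpler
-- what changed: One forward pass emitting each band directly from the running radius, instead of materialising the intermediate highs list and pairing by index lookback.
import Mathlib
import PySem

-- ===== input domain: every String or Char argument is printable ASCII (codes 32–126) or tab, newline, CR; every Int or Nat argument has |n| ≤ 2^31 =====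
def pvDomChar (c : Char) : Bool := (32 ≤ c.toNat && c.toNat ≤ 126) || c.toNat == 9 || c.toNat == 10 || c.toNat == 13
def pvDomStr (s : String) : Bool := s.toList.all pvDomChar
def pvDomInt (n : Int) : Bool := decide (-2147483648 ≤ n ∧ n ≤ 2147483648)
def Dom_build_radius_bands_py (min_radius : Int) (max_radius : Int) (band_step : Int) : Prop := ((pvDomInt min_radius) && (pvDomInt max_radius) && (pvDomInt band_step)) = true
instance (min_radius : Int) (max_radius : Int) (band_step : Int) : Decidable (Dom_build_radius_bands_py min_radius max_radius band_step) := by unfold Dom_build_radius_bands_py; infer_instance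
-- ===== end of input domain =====

-- B folds A's two phases (build the highs list, then pair by index lookback) into one forward
-- pass that keeps only the running radius; same values, simpler decomposition.

-- ===== PORT A =====
-- A's while-loop building `highs`. Python diverges when band_step ≤ 0 and current > min
-- (equivalently on both sides); the port's guard simply stops there to stay total.
def pyHighsLoop (mn step current : Int) : List Int :=
  if _h : mn < current ∧ 1 ≤ step then
    current :: pyHighsLoop mn step (current - step)
  else []
termination_by (current - mn).toNat
decreasing_by omega

-- A's for-loop over enumerate(highs): low = highs[idx+1] + 1 when it exists, else min_radius.
def pyBands (mn : Int) : List Int → List (Int × Int)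
  | [] => []
  | [h] => [(mn, h)]
  | h :: h2 :: t => (h2 + 1, h) :: pyBands mn (h2 :: t)

def build_radius_bands_py (min_radius : Int) (max_radius : Int) (band_step : Int) : List (Int × Int) :=
  pyBands min_radius (pyHighsLoop min_radius band_step max_radius ++ [min_radius])

-- ===== PORT B =====
-- B's single while-loop; same totalising guard as A's loop for band_step ≤ 0.
def altLoop (mn step current : Int) : List (Int × Int) :=
  if _h : mn < current ∧ 1 ≤ step then
    (if mn < current - step then current - step + 1 else mn + 1, current) ::
      altLoop mn step (current - step)
  else []
termination_by (current - mn).toNat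
decreasing_by omega

def build_radius_bands_py_alt (min_radius : Int) (max_radius : Int) (band_step : Int) : List (Int × Int) :=
  altLoop min_radius band_step max_radius ++ [(min_radius, min_radius)]

-- ===== PRECONDITION & SPEC =====
def Spec_build_radius_bands_py (min_radius : Int) (max_radius : Int) (band_step : Int) (out : List (Int × Int)) : Prop := out = build_radius_bands_py_alt min_radius max_radius band_step
instance (min_radius : Int) (max_radius : Int) (band_step : Int) (out : List (Int × Int)) : Decidable (Spec_build_radius_bands_py min_radius max_radius band_step out) := by unfold Spec_build_radius_bands_py; infer_instance

-- ===== CLAIM (what is proved, stated in full; the proofs are below) =====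
def Claim_equal_build_radius_bands_py : Prop := ∀ (min_radius : Int) (max_radius : Int) (band_step : Int), Dom_build_radius_bands_py min_radius max_radius band_step → Spec_build_radius_bands_py min_radius max_radius band_step (build_radius_bands_py min_radius max_radius band_step)

-- ===== LEMMAS AND PROOFS =====

lemma highs_bands_eq_alt (mn step c : Int) :
    pyBands mn (pyHighsLoop mn step c ++ [mn]) = altLoop mn step c ++ [(mn, mn)] := by
  fun_induction pyHighsLoop mn step c with
  | case1 c h ih =>
    rw [altLoop, dif_pos h]
    by_cases h2 : mn < c - step
    · have hrest : pyHighsLoop mn step (c - step)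
          = (c - step) :: pyHighsLoop mn step (c - step - step) := by
        rw [pyHighsLoop]; simp [h2, h.2]
      rw [hrest] at ih ⊢
      simp only [List.cons_append, pyBands, if_pos h2]
      exact congrArg _ ih
    · have hrest : pyHighsLoop mn step (c - step) = [] := by
        rw [pyHighsLoop]; simp [h2]
      rw [hrest] at ih ⊢
      simp only [List.cons_append, List.nil_append, pyBands, if_neg h2] at ih ⊢
      exact congrArg _ ih
  | case2 c h =>
    rw [altLoop, dif_neg h]
    simp [pyBands]

-- ===== VERDICT (by name: the statement is the Claim_ definition above) =====
theorem build_radius_bands_py_spec : Claim_equal_build_radius_bands_py := by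
  intro mn mx st _
  unfold Spec_build_radius_bands_py build_radius_bands_py build_radius_bands_py_alt
  exact highs_bands_eq_alt mn st mx
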